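-- pv_equiv track=rewrite | github.com/PhysicsResearch/AMIGOpy | fcn_load/org_fol_dcm.py | generate_patient_id_map
-- ===== SOURCE A (Python) =====
-- def generate_patient_id_map(detailed_files_info, max_length=30):
--     patient_id_map = {}
--     short_name_counter = 1
--
--     for info in detailed_files_info:
--         patient_id = info["PatientID"]
--         if len(patient_id) > max_length:
--             if patient_id not in patient_id_map:
--                 patient_id_map[patient_id] = f"Pat_{short_name_counter:02d}"
--                 short_name_counter += 1
--         else:
--             patient_id_map[patient_id] = patient_id
--
--     return patient_id_map
-- ===== SOURCE B (Python) =====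
-- def generate_patient_id_map(detailed_files_info, max_length=30):
--     # index-build-then-assign: ordered dedup of the IDs, then alias table for the long ones
--     unique_ids = list(dict.fromkeys(info["PatientID"] for info in detailed_files_info))
--     long_ids = [p for p in unique_ids if len(p) > max_length]
--     alias = {p: f"Pat_{i + 1:02d}" for i, p in enumerate(long_ids)}
--     return {p: alias.get(p, p) for p in unique_ids}
-- ===== Notes on version B (the rewrite author's own statement) =====
-- stated objective: simpler
-- what changed: Replaces A's interleaved stateful scan (dict + running counter mutated per record) by three declarative passes: ordered dedup of the IDs, enumerate the long ones to build the alias table, then one shaped comprehension producing the map.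
import Mathlib
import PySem

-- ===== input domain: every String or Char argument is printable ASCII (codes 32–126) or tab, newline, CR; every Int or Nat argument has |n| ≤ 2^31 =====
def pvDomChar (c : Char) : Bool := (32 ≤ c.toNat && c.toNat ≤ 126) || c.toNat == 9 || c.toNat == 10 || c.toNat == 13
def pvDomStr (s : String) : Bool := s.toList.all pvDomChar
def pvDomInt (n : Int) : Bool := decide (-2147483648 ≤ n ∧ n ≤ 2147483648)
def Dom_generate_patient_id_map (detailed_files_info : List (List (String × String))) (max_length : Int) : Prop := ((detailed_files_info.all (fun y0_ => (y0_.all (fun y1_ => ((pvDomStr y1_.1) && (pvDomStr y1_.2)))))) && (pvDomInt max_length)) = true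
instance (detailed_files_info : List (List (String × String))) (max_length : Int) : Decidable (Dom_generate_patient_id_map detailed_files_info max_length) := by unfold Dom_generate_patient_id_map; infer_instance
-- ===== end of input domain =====

-- B replaces A's single stateful scan (dict + running counter) by dedup / enumerate-the-long-ids / one shaped
-- comprehension; same values, objective: simpler decomposition (no speed claim).

-- shared helpers (both Pythons format f"Pat_{c:02d}" and read info["PatientID"])
def pvFmt (c : Int) : String :=
  String.ofList (['P', 'a', 't', '_'] ++ PySem.Chars.zfill (PySem.Int.toChars c) 2)

def pvGetPid (info : List (String × String)) : Option String :=
  (PySem.Dict.mk info).get? "PatientID"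

-- ===== PORT A =====
-- one loop body step of A, on the already-extracted patient_id
def pvStepA (max_length : Int) (st : PySem.Dict String String × Int) (pid : String) :
    PySem.Dict String String × Int :=
  if max_length < PySem.Str.len pid then
    if st.1.contains pid then st
    else (st.1.insert pid (pvFmt st.2), st.2 + 1)
  else (st.1.insert pid pid, st.2)

def generate_patient_id_map (detailed_files_info : List (List (String × String))) (max_length : Int) : List (String × String) :=
  (detailed_files_info.foldl
    (fun st info =>
      match pvGetPid info with
      | none => st                     -- Python raises KeyError here; excluded by Pre_
      | some pid => pvStepA max_length st pid)
    (PySem.Dict.empty, 1)).1.items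

-- ===== PORT B =====
def generate_patient_id_map_alt (detailed_files_info : List (List (String × String))) (max_length : Int) : List (String × String) :=
  let unique_ids := PySem.List.dedup (detailed_files_info.filterMap pvGetPid)
  let long_ids := unique_ids.filter (fun p => decide (max_length < PySem.Str.len p))
  let alias_ := (PySem.List.enumerate long_ids 0).foldl
      (fun a ip => a.insert ip.2 (pvFmt (ip.1 + 1))) PySem.Dict.empty
  unique_ids.map (fun p => (p, alias_.getD p p))

-- ===== PRECONDITION & SPEC =====
-- Pre_ excludes exactly the inputs where Python A raises KeyError: a record without a "PatientID" key.
def Pre_generate_patient_id_map (detailed_files_info : List (List (String × String))) (max_length : Int) : Prop :=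
  ∀ info ∈ detailed_files_info, ((PySem.Dict.mk info).get? "PatientID").isSome = true

instance (detailed_files_info : List (List (String × String))) (max_length : Int) : Decidable (Pre_generate_patient_id_map detailed_files_info max_length) := by
  unfold Pre_generate_patient_id_map; infer_instance

def pvWitness_generate_patient_id_map : (List (List (String × String))) × Int :=
  ([[("PatientID", "abc")], [("PatientID", "x"), ("Modality", "CT")]], 2)

def Spec_generate_patient_id_map (detailed_files_info : List (List (String × String))) (max_length : Int) (out : List (String × String)) : Prop := out = generate_patient_id_map_alt detailed_files_info max_length
instance (detailed_files_info : List (List (String × String))) (max_length : Int) (out : List (String × String)) : Decidable (Spec_generate_patient_id_map detailed_files_info max_length out) := by unfold Spec_generate_patient_id_map; infer_instance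

-- ===== CLAIM (what is proved, stated in full; the proofs are below) =====
def Claim_equal_generate_patient_id_map : Prop := ∀ (detailed_files_info : List (List (String × String))) (max_length : Int), Dom_generate_patient_id_map detailed_files_info max_length → Pre_generate_patient_id_map detailed_files_info max_length → Spec_generate_patient_id_map detailed_files_info max_length (generate_patient_id_map detailed_files_info max_length)

-- ===== LEMMAS AND PROOFS =====

-- the common canonical result: first-appearance-unique ids, long ones numbered c, c+1, …
def pvMapOut (m : Int) : List String → Int → List (String × String)
  | [], _ => []
  | p :: ps, c =>
    if m < PySem.Str.len p then (p, pvFmt c) :: pvMapOut m ps (c + 1)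
    else (p, p) :: pvMapOut m ps c

-- first-appearance dedup relative to an already-seen list
def pvDed (ps : List String) (seen : List String) : List String :=
  match ps with
  | [] => []
  | p :: ps => if p ∈ seen then pvDed ps seen else p :: pvDed ps (seen ++ [p])

theorem pv_foldl_match (l : List (List (String × String))) (m : Int)
    (st : PySem.Dict String String × Int) :
    l.foldl (fun st info => match pvGetPid info with
                            | none => st
                            | some pid => pvStepA m st pid) st
      = (l.filterMap pvGetPid).foldl (pvStepA m) st := by
  induction l generalizing st with
  | nil => rfl
  | cons info l ih =>
    cases h : pvGetPid info <;> simp [h, ih]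

theorem pv_foldl_add_eq_ded (ps : List String) (s : PySem.Set String) :
    ps.foldl PySem.Set.add s = s ++ pvDed ps s := by
  induction ps generalizing s with
  | nil => simp [pvDed]
  | cons p ps ih =>
    by_cases hp : p ∈ s
    · simp [pvDed, hp, ih]
    · simp [pvDed, hp, ih]

theorem pv_dedup_eq_ded (ps : List String) :
    PySem.List.dedup ps = pvDed ps [] := by
  have h := pv_foldl_add_eq_ded ps []
  simpa [PySem.Set.ofList_eq_foldl] using h

-- A's fold, characterised: it appends pvMapOut of the unseen ids
theorem pv_stepA_items (m : Int) (ps : List String) (d : PySem.Dict String String) (c : Int)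
    (hnd : d.keys.Nodup)
    (hinv : ∀ p v, d.get? p = some v → ¬ m < PySem.Str.len p → v = p) :
    (ps.foldl (pvStepA m) (d, c)).1.items
      = d.items ++ pvMapOut m (pvDed ps d.keys) c := by
  induction ps generalizing d c with
  | nil => simp [pvDed, pvMapOut]
  | cons p ps ih =>
    by_cases hmem : p ∈ d.keys
    · -- already in the dict
      have hcont : d.contains p = true := by
        rw [PySem.Dict.contains_eq_decide_mem_keys]; simpa using hmem
      by_cases hlen : m < PySem.Str.len p
      · simp only [List.foldl_cons, pvStepA, if_pos hlen, hcont, if_pos]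
        simpa [pvDed, hmem] using ih d c hnd hinv
      · -- short id already present: re-insert is the identity
        have hsome : (d.get? p).isSome = true := by
          rw [← PySem.Dict.contains_eq_isSome_get?]; exact hcont
        obtain ⟨v, hv⟩ := Option.isSome_iff_exists.mp hsome
        have hv' : d.get? p = some p := by rw [hv, hinv p v hv hlen]
        have hins : d.insert p p = d := by
          apply PySem.Dict.ext
          rw [PySem.Dict.items_insert_of_contains _ _ hcont]
          conv_rhs => rw [← List.map_id d.items]
          apply List.map_congr_left
          intro x hx
          obtain ⟨a, b⟩ := x
          have hgx : d.get? a = some b := PySem.Dict.get?_of_mem_items _ hx hnd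
          by_cases hxp : a = p
          · subst hxp
            have hb2 : b = a := by
              rw [hv'] at hgx
              exact (Option.some_inj.mp hgx).symm
            subst hb2
            simp
          · simp [hxp]
        simp only [List.foldl_cons, pvStepA, if_neg hlen, hins]
        simpa [pvDed, hmem] using ih d c hnd hinv
    · -- fresh id: the insert appends
      have hcont : d.contains p = false := by
        rw [PySem.Dict.contains_eq_decide_mem_keys]; simpa using hmem
      have hded : pvDed (p :: ps) d.keys = p :: pvDed ps (d.keys ++ [p]) := by
        simp [pvDed, hmem]
      by_cases hlen : m < PySem.Str.len p
      · simp only [List.foldl_cons, pvStepA, if_pos hlen, hcont, Bool.false_eq_true, if_neg,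
          not_false_iff]
        have hnd' : (d.insert p (pvFmt c)).keys.Nodup := PySem.Dict.nodup_keys_insert _ _ _ hnd
        have hinv' : ∀ q v, (d.insert p (pvFmt c)).get? q = some v → ¬ m < PySem.Str.len q → v = q := by
          intro q v hq hql
          rw [PySem.Dict.get?_insert] at hq
          by_cases hqp : q = p
          · exact absurd hlen (by rw [hqp] at hql; exact hql)
          · exact hinv q v (by simpa [hqp] using hq) hql
        rw [ih (d.insert p (pvFmt c)) (c + 1) hnd' hinv',
          PySem.Dict.items_insert_of_not_contains _ _ hcont,
          PySem.Dict.keys_insert_of_not_contains _ _ hcont, hded,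
          show pvMapOut m (p :: pvDed ps (d.keys ++ [p])) c
              = (p, pvFmt c) :: pvMapOut m (pvDed ps (d.keys ++ [p])) (c + 1) from by
            have hlen' : m < (p.length : Int) := by simpa using hlen
            simp [pvMapOut, hlen']]
        simp
      · simp only [List.foldl_cons, pvStepA, if_neg hlen, hcont]
        have hnd' : (d.insert p p).keys.Nodup := PySem.Dict.nodup_keys_insert _ _ _ hnd
        have hinv' : ∀ q v, (d.insert p p).get? q = some v → ¬ m < PySem.Str.len q → v = q := by
          intro q v hq hql
          rw [PySem.Dict.get?_insert] at hq
          by_cases hqp : q = p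
          · subst hqp
            rw [if_pos rfl] at hq
            exact (Option.some_inj.mp hq).symm
          · exact hinv q v (by simpa [hqp] using hq) hql
        rw [ih (d.insert p p) c hnd' hinv',
          PySem.Dict.items_insert_of_not_contains _ _ hcont,
          PySem.Dict.keys_insert_of_not_contains _ _ hcont, hded,
          show pvMapOut m (p :: pvDed ps (d.keys ++ [p])) c
              = (p, p) :: pvMapOut m (pvDed ps (d.keys ++ [p])) c from by
            have hlen' : ¬ m < (p.length : Int) := by simpa using hlen
            simp [pvMapOut, hlen']]
        simp

-- B's alias dict, looked up pointwise
def pvAliasFold (ls : List String) (k : Int) : PySem.Dict String String :=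
  (PySem.List.enumerate ls k).foldl (fun a ip => a.insert ip.2 (pvFmt (ip.1 + 1))) PySem.Dict.empty

theorem pv_getD_alias (ls : List String) (k : Int) (q : String) (hnd : ls.Nodup) :
    (pvAliasFold ls k).getD q q
      = if q ∈ ls then pvFmt (k + 1 + (ls.idxOf q : Int)) else q := by
  induction ls using List.reverseRecOn with
  | nil => simp [pvAliasFold, PySem.List.enumerate, PySem.Dict.getD_empty]
  | append_singleton ls x ih =>
    have hndc : (x :: ls).Nodup := by
      rw [← List.singleton_append] at *
      exact List.nodup_append_comm.mp hnd
    have hx : x ∉ ls := (List.nodup_cons.mp hndc).1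
    have hndl : ls.Nodup := (List.nodup_cons.mp hndc).2
    have hfold : pvAliasFold (ls ++ [x]) k
        = (pvAliasFold ls k).insert x (pvFmt (k + ls.length + 1)) := by
      unfold pvAliasFold
      rw [PySem.List.enumerate_append, List.foldl_append]
      simp [PySem.List.enumerate]
    rw [hfold, PySem.Dict.getD_insert]
    by_cases hqx : q = x
    · subst hqx
      have hidx : (ls ++ [q]).idxOf q = ls.length := by
        rw [List.idxOf_append_of_notMem hx]; simp
      simp only [List.mem_append, List.mem_singleton, or_true, if_pos, hidx]
      congr 1; ring
    · rw [if_neg hqx, ih hndl]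
      by_cases hq : q ∈ ls
      · have : q ∈ ls ++ [x] := List.mem_append_left _ hq
        rw [if_pos hq, if_pos this, List.idxOf_append_of_mem hq]
      · have : q ∉ ls ++ [x] := by
          simp [List.mem_append, hq, hqx]
        rw [if_neg hq, if_neg this]

theorem pv_mapB (m : Int) (u : List String) (k : Int) (hnd : u.Nodup) :
    u.map (fun p => (p,
        (pvAliasFold (u.filter (fun q => decide (m < PySem.Str.len q))) k).getD p p))
      = pvMapOut m u (k + 1) := by
  induction u generalizing k with
  | nil => simp [pvMapOut]
  | cons p us ih =>
    have hndus : us.Nodup := (List.nodup_cons.mp hnd).2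
    have hpus : p ∉ us := (List.nodup_cons.mp hnd).1
    have hndF : (us.filter (fun q => decide (m < PySem.Str.len q))).Nodup := hndus.filter _
    by_cases hlen : m < PySem.Str.len p
    · have hlen' : m < (p.length : Int) := by simpa using hlen
      have hfil : (p :: us).filter (fun q => decide (m < PySem.Str.len q))
          = p :: us.filter (fun q => decide (m < PySem.Str.len q)) := by
        simp [hlen']
      have hndpf : (p :: us.filter (fun q => decide (m < PySem.Str.len q))).Nodup := by
        rw [← hfil]; exact hnd.filter _
      rw [hfil]
      have hhead : (pvAliasFold (p :: us.filter (fun q => decide (m < PySem.Str.len q))) k).getD p p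
          = pvFmt (k + 1) := by
        rw [pv_getD_alias _ _ _ hndpf]
        simp [List.idxOf_cons_self]
      have htail : ∀ q ∈ us,
          (pvAliasFold (p :: us.filter (fun q => decide (m < PySem.Str.len q))) k).getD q q
            = (pvAliasFold (us.filter (fun q => decide (m < PySem.Str.len q))) (k + 1)).getD q q := by
        intro q hq
        have hqp : q ≠ p := fun h => hpus (h ▸ hq)
        rw [pv_getD_alias _ _ _ hndpf, pv_getD_alias _ _ _ hndF]
        by_cases hqF : q ∈ us.filter (fun q => decide (m < PySem.Str.len q))
        · have hqpf : q ∈ p :: us.filter (fun q => decide (m < PySem.Str.len q)) :=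
            List.mem_cons_of_mem _ hqF
          rw [if_pos hqpf, if_pos hqF, List.idxOf_cons_ne _ (Ne.symm hqp)]
          congr 1; push_cast; ring
        · have hnotin : q ∉ p :: us.filter (fun q => decide (m < PySem.Str.len q)) := by
            intro hmem
            rcases List.mem_cons.mp hmem with h | h
            · exact hqp h
            · exact hqF h
          rw [if_neg hnotin, if_neg hqF]
      calc (p :: us).map (fun q => (q,
              (pvAliasFold (p :: us.filter (fun q => decide (m < PySem.Str.len q))) k).getD q q))
          = (p, pvFmt (k + 1)) :: us.map (fun q =>
              (q, (pvAliasFold (us.filter (fun q => decide (m < PySem.Str.len q))) (k + 1)).getD q q)) := by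
            rw [List.map_cons, hhead]
            congr 1
            exact List.map_congr_left (fun q hq => by rw [htail q hq])
        _ = pvMapOut m (p :: us) (k + 1) := by
            rw [ih (k + 1) hndus]
            simp [pvMapOut, hlen']
    · have hlen' : ¬ m < (p.length : Int) := by simpa using hlen
      have hfil : (p :: us).filter (fun q => decide (m < PySem.Str.len q))
          = us.filter (fun q => decide (m < PySem.Str.len q)) := by
        simp [hlen']
      rw [hfil, List.map_cons]
      have hhead : (pvAliasFold (us.filter (fun q => decide (m < PySem.Str.len q))) k).getD p p = p := by
        rw [pv_getD_alias _ _ _ hndF]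
        have : p ∉ us.filter (fun q => decide (m < PySem.Str.len q)) := by
          intro h; exact hlen (by simpa using (List.mem_filter.mp h).2)
        rw [if_neg this]
      rw [hhead, ih k hndus]
      simp [pvMapOut, hlen']

-- ===== VERDICT (by name: the statement is the Claim_ definition above) =====
theorem generate_patient_id_map_spec : Claim_equal_generate_patient_id_map := by
  intro l m _hdom _hpre
  show generate_patient_id_map l m = generate_patient_id_map_alt l m
  unfold generate_patient_id_map generate_patient_id_map_alt
  rw [pv_foldl_match]
  rw [pv_stepA_items m (l.filterMap pvGetPid) PySem.Dict.empty 1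
        PySem.Dict.nodup_keys_empty
        (by intro p v hv; rw [PySem.Dict.get?_empty] at hv; exact absurd hv (by simp))]
  have hB := pv_mapB m (PySem.List.dedup (l.filterMap pvGetPid)) 0
      (PySem.List.nodup_dedup _)
  simp only [pvAliasFold] at hB
  rw [hB]
  rw [pv_dedup_eq_ded]
  simp [PySem.Dict.empty]
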